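-- pv_equiv track=rewrite | github.com/haydencscott84-star/Nexus-Core | app.py | style_killbox_status
-- ===== SOURCE A (Python) =====
-- def style_killbox_status(s):
--     colors = []
--     for val in s:
--         val_str = str(val).upper()
--         # Same scheme as terminal UI
--         if "LIQUIDATION" in val_str: colors.append('background-color: #c0392b; color: white; font-weight: bold;')
--         elif "BURNING" in val_str: colors.append('color: #e74c3c; font-weight: bold;')
--         elif "TRAPPED BULLS" in val_str: colors.append('color: #2ecc71; font-weight: bold;') # Bull traps are good for bears
--         elif "TRAPPED BEARS" in val_str: colors.append('color: #e74c3c; font-weight: bold;') # Bear traps are good for bulls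
--         elif "ROCKET FUEL" in val_str: colors.append('color: #e74c3c; font-weight: bold; background-color: rgba(231, 76, 60, 0.15);')
--         elif "RESISTANCE" in val_str: colors.append('color: #e74c3c; font-weight: bold; background-color: rgba(231, 76, 60, 0.15);')
--         else: colors.append('color: #f39c12;')
--     return colors
-- ===== SOURCE B (Python) =====
-- TABLE = [
--     ("LIQUIDATION", 'background-color: #c0392b; color: white; font-weight: bold;'),
--     ("BURNING", 'color: #e74c3c; font-weight: bold;'),
--     ("TRAPPED BULLS", 'color: #2ecc71; font-weight: bold;'),
--     ("TRAPPED BEARS", 'color: #e74c3c; font-weight: bold;'),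
--     ("ROCKET FUEL", 'color: #e74c3c; font-weight: bold; background-color: rgba(231, 76, 60, 0.15);'),
--     ("RESISTANCE", 'color: #e74c3c; font-weight: bold; background-color: rgba(231, 76, 60, 0.15);'),
-- ]
-- DEFAULT = 'color: #f39c12;'
--
-- def style_killbox_status(s):
--     ups = [str(val).upper() for val in s]
--     colors = [DEFAULT] * len(ups)
--     # keyword-major: lowest-priority keyword first, higher-priority ones overwrite
--     for key, style in reversed(TABLE):
--         for i, u in enumerate(ups):
--             if key in u:
--                 colors[i] = style
--     return colors
-- ===== Notes on version B (the rewrite author's own statement) =====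
-- stated objective: alternative
-- what changed: B is keyword-major: it initializes every output to the default style and then, for each (keyword, style) pair in reverse priority order, overwrites the style of every element containing that keyword, so the highest-priority match writes last; A is element-major with a first-match if/elif cascade.
import Mathlib
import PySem

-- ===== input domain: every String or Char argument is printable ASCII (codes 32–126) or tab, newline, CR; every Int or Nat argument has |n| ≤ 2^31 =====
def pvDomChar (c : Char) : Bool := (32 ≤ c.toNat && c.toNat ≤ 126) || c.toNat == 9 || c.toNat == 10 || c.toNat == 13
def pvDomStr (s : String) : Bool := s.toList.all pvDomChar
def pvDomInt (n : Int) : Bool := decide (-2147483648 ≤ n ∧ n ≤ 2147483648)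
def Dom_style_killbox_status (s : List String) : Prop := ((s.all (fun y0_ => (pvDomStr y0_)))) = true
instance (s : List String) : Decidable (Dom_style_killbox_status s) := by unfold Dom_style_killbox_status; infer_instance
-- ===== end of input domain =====

-- B is keyword-major (default-fill then overwrite per keyword in reverse priority order) where A is an element-major first-match cascade (objective: alternative).
-- ===== PORT A =====
def style_killbox_status (s : List String) : List String :=
  s.foldl (fun colors val =>
    let val_str := PySem.Str.upper val
    if PySem.Str.isIn "LIQUIDATION" val_str then
      colors ++ ["background-color: #c0392b; color: white; font-weight: bold;"]
    else if PySem.Str.isIn "BURNING" val_str then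
      colors ++ ["color: #e74c3c; font-weight: bold;"]
    else if PySem.Str.isIn "TRAPPED BULLS" val_str then
      colors ++ ["color: #2ecc71; font-weight: bold;"]
    else if PySem.Str.isIn "TRAPPED BEARS" val_str then
      colors ++ ["color: #e74c3c; font-weight: bold;"]
    else if PySem.Str.isIn "ROCKET FUEL" val_str then
      colors ++ ["color: #e74c3c; font-weight: bold; background-color: rgba(231, 76, 60, 0.15);"]
    else if PySem.Str.isIn "RESISTANCE" val_str then
      colors ++ ["color: #e74c3c; font-weight: bold; background-color: rgba(231, 76, 60, 0.15);"]
    else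
      colors ++ ["color: #f39c12;"]) []

-- ===== PORT B =====
def pvTable : List (String × String) :=
  [("LIQUIDATION", "background-color: #c0392b; color: white; font-weight: bold;"),
   ("BURNING", "color: #e74c3c; font-weight: bold;"),
   ("TRAPPED BULLS", "color: #2ecc71; font-weight: bold;"),
   ("TRAPPED BEARS", "color: #e74c3c; font-weight: bold;"),
   ("ROCKET FUEL", "color: #e74c3c; font-weight: bold; background-color: rgba(231, 76, 60, 0.15);"),
   ("RESISTANCE", "color: #e74c3c; font-weight: bold; background-color: rgba(231, 76, 60, 0.15);")]

def pvDefault : String := "color: #f39c12;"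

-- the inner pass: 'for i, u in enumerate(ups): if key in u: colors[i] = style'
def pvOverwrite (key style : String) (ups colors : List String) : List String :=
  (ups.zip colors).map (fun p => if PySem.Str.isIn key p.1 then style else p.2)

def style_killbox_status_alt (s : List String) : List String :=
  let ups := s.map (fun val => PySem.Str.upper val)
  pvTable.reverse.foldl (fun colors ks => pvOverwrite ks.1 ks.2 ups colors)
    (List.replicate ups.length pvDefault)

-- ===== PRECONDITION & SPEC =====
def Spec_style_killbox_status (s : List String) (out : List String) : Prop := out = style_killbox_status_alt s
instance (s : List String) (out : List String) : Decidable (Spec_style_killbox_status s out) := by unfold Spec_style_killbox_status; infer_instance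

-- ===== CLAIM (what is proved, stated in full; the proofs are below) =====
def Claim_equal_style_killbox_status : Prop := ∀ (s : List String), Dom_style_killbox_status s → Spec_style_killbox_status s (style_killbox_status s)

-- ===== LEMMAS AND PROOFS =====

-- A's per-element cascade, factored out.
def pvCascade (val : String) : String :=
  let val_str := PySem.Str.upper val
  if PySem.Str.isIn "LIQUIDATION" val_str then
    "background-color: #c0392b; color: white; font-weight: bold;"
  else if PySem.Str.isIn "BURNING" val_str then
    "color: #e74c3c; font-weight: bold;"
  else if PySem.Str.isIn "TRAPPED BULLS" val_str then
    "color: #2ecc71; font-weight: bold;"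
  else if PySem.Str.isIn "TRAPPED BEARS" val_str then
    "color: #e74c3c; font-weight: bold;"
  else if PySem.Str.isIn "ROCKET FUEL" val_str then
    "color: #e74c3c; font-weight: bold; background-color: rgba(231, 76, 60, 0.15);"
  else if PySem.Str.isIn "RESISTANCE" val_str then
    "color: #e74c3c; font-weight: bold; background-color: rgba(231, 76, 60, 0.15);"
  else "color: #f39c12;"

-- A's foldl with append accumulates exactly the map of the cascade.
theorem pvFoldl_eq (s : List String) (acc : List String) :
    s.foldl (fun colors val =>
      let val_str := PySem.Str.upper val
      if PySem.Str.isIn "LIQUIDATION" val_str then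
        colors ++ ["background-color: #c0392b; color: white; font-weight: bold;"]
      else if PySem.Str.isIn "BURNING" val_str then
        colors ++ ["color: #e74c3c; font-weight: bold;"]
      else if PySem.Str.isIn "TRAPPED BULLS" val_str then
        colors ++ ["color: #2ecc71; font-weight: bold;"]
      else if PySem.Str.isIn "TRAPPED BEARS" val_str then
        colors ++ ["color: #e74c3c; font-weight: bold;"]
      else if PySem.Str.isIn "ROCKET FUEL" val_str then
        colors ++ ["color: #e74c3c; font-weight: bold; background-color: rgba(231, 76, 60, 0.15);"]
      else if PySem.Str.isIn "RESISTANCE" val_str then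
        colors ++ ["color: #e74c3c; font-weight: bold; background-color: rgba(231, 76, 60, 0.15);"]
      else colors ++ ["color: #f39c12;"]) acc
    = acc ++ s.map pvCascade := by
  induction s generalizing acc with
  | nil => simp
  | cons v t ih =>
      simp only [List.foldl_cons, List.map_cons, ih, pvCascade]
      split_ifs <;> simp

-- the overwrite pass distributes over cons
theorem pvOverwrite_cons (key style u c : String) (us cs : List String) :
    pvOverwrite key style (u :: us) (c :: cs)
      = (if PySem.Str.isIn key u then style else c) :: pvOverwrite key style us cs := by
  simp [pvOverwrite]

-- B's staged overwrites equal the per-element cascade.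
theorem pvAlt_eq_map (s : List String) :
    style_killbox_status_alt s = s.map pvCascade := by
  unfold style_killbox_status_alt
  simp only [pvTable, List.reverse_cons, List.reverse_nil, List.nil_append, List.cons_append,
    List.foldl_cons, List.foldl_nil]
  induction s with
  | nil => simp [pvOverwrite]
  | cons v t ih =>
      simp only [List.map_cons, List.length_cons, List.replicate_succ, pvOverwrite_cons, ih]
      simp only [pvCascade, pvDefault]

-- ===== VERDICT (by name: the statement is the Claim_ definition above) =====
theorem style_killbox_status_spec : Claim_equal_style_killbox_status := by
  intro s _
  unfold Spec_style_killbox_status style_killbox_status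
  rw [pvAlt_eq_map]
  simpa using pvFoldl_eq s []
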